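-- pv_equiv track=rewrite | github.com/paprikka55/HW_python_less8 | task_1.py | fmt_by_mask
-- ===== SOURCE A (Python) =====
-- def fmt_by_mask(fmt, in_str):
--     res = ""
--     i = 0
--     for c in fmt:
--         if c == '#':
--             res += in_str[i:i + 1]
--             i += 1
--         else:
--             res += c
--     return res
-- ===== SOURCE B (Python) =====
-- def fmt_by_mask(fmt, in_str):
--     parts = fmt.split('#')
--     k = len(parts) - 1
--     fills = list(in_str[:k])
--     fills += [''] * (k - len(fills))
--     return parts[0] + ''.join(f + p for f, p in zip(fills, parts[1:]))
-- ===== Notes on version B (the rewrite author's own statement) =====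
-- stated objective: faster
-- what changed: Replaces A's character-by-character pass with manual index tracking and repeated string concatenation by a staged split-and-interleave: split fmt on '#' into segments, build the list of fill characters from in_str (padded with '' when in_str is too short), and join segments interleaved with fills in one ''.join.
import Mathlib
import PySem

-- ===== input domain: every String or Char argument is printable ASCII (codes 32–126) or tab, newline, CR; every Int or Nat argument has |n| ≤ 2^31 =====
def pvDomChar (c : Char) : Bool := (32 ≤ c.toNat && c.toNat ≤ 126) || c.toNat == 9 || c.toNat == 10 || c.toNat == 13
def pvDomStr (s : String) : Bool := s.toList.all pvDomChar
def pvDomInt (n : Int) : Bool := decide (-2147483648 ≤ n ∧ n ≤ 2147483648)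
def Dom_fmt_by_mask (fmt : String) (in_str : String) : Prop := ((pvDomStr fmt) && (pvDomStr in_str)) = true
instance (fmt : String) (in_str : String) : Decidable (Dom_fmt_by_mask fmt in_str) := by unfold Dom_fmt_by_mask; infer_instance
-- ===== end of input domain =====

-- B replaces A's character-by-character pass with an index counter by a staged
-- split-and-interleave: split fmt on '#', pad in_str's characters to the number of
-- gaps, and join segments interleaved with fills (same value; measured faster: one join instead of repeated concatenation).


-- ===== PORT A =====
-- res = ""; i = 0; for c in fmt: if c == '#': res += in_str[i:i+1]; i += 1 else: res += c
def fmt_by_mask (fmt : String) (in_str : String) : String :=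
  String.ofList
    (fmt.toList.foldl
      (fun (st : List Char × Int) c =>
        if c = '#' then
          (st.1 ++ PySem.List.slice in_str.toList (some st.2) (some (st.2 + 1)), st.2 + 1)
        else
          (st.1 ++ [c], st.2))
      ([], 0)).1

-- ===== PORT B =====
-- parts = fmt.split('#'); k = len(parts) - 1; fills = list(in_str[:k]);
-- fills += [''] * (k - len(fills));
-- return parts[0] + ''.join(f + p for f, p in zip(fills, parts[1:]))
-- (Python strings are List Char here; each fill '' / single char is a List Char piece,
-- ''.join is PySem.Chars.join [], parts[0] never raises since split is nonempty → headD)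
def fmt_by_mask_alt (fmt : String) (in_str : String) : String :=
  let parts := PySem.Chars.splitOn fmt.toList ['#']
  let k := parts.length - 1
  let fills0 := PySem.List.slice in_str.toList none (some (k : Int))
  let fills := fills0.map (fun c => [c]) ++ List.replicate (k - fills0.length) ([] : List Char)
  String.ofList
    (parts.headD [] ++
      PySem.Chars.join [] (((fills.zip (parts.drop 1)).map (fun fp => fp.1 ++ fp.2))))

-- ===== PRECONDITION & SPEC =====
def Spec_fmt_by_mask (fmt : String) (in_str : String) (out : String) : Prop := out = fmt_by_mask_alt fmt in_str
instance (fmt : String) (in_str : String) (out : String) : Decidable (Spec_fmt_by_mask fmt in_str out) := by unfold Spec_fmt_by_mask; infer_instance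

-- ===== CLAIM =====
def Claim_equal_fmt_by_mask : Prop := ∀ (fmt : String) (in_str : String), Dom_fmt_by_mask fmt in_str → Spec_fmt_by_mask fmt in_str (fmt_by_mask fmt in_str)

-- ===== LEMMAS AND PROOFS =====

-- common semantic core: fill each '#' with the next character of ins (nothing on overrun)
def pvG : List Char → List Char → List Char
  | [], _ => []
  | c :: r, ins => if c = '#' then ins.take 1 ++ pvG r (ins.drop 1) else c :: pvG r ins

-- structural characterisation of split on the single character '#'
def pvConsHead (x : List Char) : List (List Char) → List (List Char)
  | [] => [x]
  | p :: ps => (x ++ p) :: ps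

def pvSplit : List Char → List (List Char)
  | [] => [[]]
  | c :: r => if c = '#' then [] :: pvSplit r else pvConsHead [c] (pvSplit r)

theorem pvSplit_ne_nil (l : List Char) : pvSplit l ≠ [] := by
  cases l with
  | nil => simp [pvSplit]
  | cons c r =>
    simp only [pvSplit]
    split
    · simp
    · rcases h : pvSplit r with _ | ⟨p, ps⟩ <;> simp [pvConsHead]

theorem splitOn_go_spec (l : List Char) : ∀ (f : Nat) (cur : List Char) (acc : List (List Char)),
    l.length < f →
    PySem.Chars.splitOn.go ['#'] f l cur acc = acc.reverse ++ pvConsHead cur.reverse (pvSplit l) := by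
  induction l with
  | nil =>
    intro f cur acc hf
    cases f with
    | zero => omega
    | succ f' => simp [PySem.Chars.splitOn.go, pvSplit, pvConsHead]
  | cons c r ih =>
    intro f cur acc hf
    cases f with
    | zero => simp at hf
    | succ f' =>
      by_cases hc : c = '#'
      · subst hc
        rw [show PySem.Chars.splitOn.go ['#'] (f' + 1) ('#' :: r) cur acc
              = PySem.Chars.splitOn.go ['#'] f' r [] (cur.reverse :: acc) by
            simp [PySem.Chars.splitOn.go, List.isPrefixOf]]
        rw [ih f' [] (cur.reverse :: acc) (by simpa using Nat.lt_of_succ_lt_succ hf)]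
        rcases h : pvSplit r with _ | ⟨q, qs⟩
        · exact absurd h (pvSplit_ne_nil r)
        · simp [pvSplit, pvConsHead, h]
      · rw [show PySem.Chars.splitOn.go ['#'] (f' + 1) (c :: r) cur acc
              = PySem.Chars.splitOn.go ['#'] f' r (c :: cur) acc by
            have h2 : ('#' == c) = false := by simp [Ne.symm hc]
            simp [PySem.Chars.splitOn.go, List.isPrefixOf, h2]]
        rw [ih f' (c :: cur) acc (by simpa using Nat.lt_of_succ_lt_succ hf)]
        rcases h : pvSplit r with _ | ⟨q, qs⟩
        · exact absurd h (pvSplit_ne_nil r)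
        · simp [pvSplit, pvConsHead, h, hc]

theorem splitOn_char (l : List Char) : PySem.Chars.splitOn l ['#'] = pvSplit l := by
  rw [show PySem.Chars.splitOn l ['#'] = PySem.Chars.splitOn.go ['#'] (l.length + 1) l [] [] from rfl,
    splitOn_go_spec l (l.length + 1) [] [] (by omega)]
  rcases h : pvSplit l with _ | ⟨q, qs⟩
  · exact absurd h (pvSplit_ne_nil l)
  · simp [pvConsHead]

theorem join_nil_flatten (ps : List (List Char)) : PySem.Chars.join [] ps = ps.flatten := by
  induction ps with
  | nil => simp [PySem.Chars.join, List.intercalate]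
  | cons h t ih =>
    cases t with
    | nil => simp [PySem.Chars.join, List.intercalate]
    | cons x xs =>
      simp only [PySem.Chars.join, List.intercalate, List.intersperse] at *
      simp_all

-- interleaving the split segments with the padded fills is exactly pvG
theorem inter_eq (fs : List Char) : ∀ ins : List Char,
    (pvSplit fs).headD [] ++
      List.flatten
        (List.map (fun fp => fp.1 ++ fp.2)
          (List.zip
            ((ins.take ((pvSplit fs).length - 1)).map (fun c => [c]) ++
              List.replicate
                (((pvSplit fs).length - 1) - (ins.take ((pvSplit fs).length - 1)).length)
                ([] : List Char))
            ((pvSplit fs).drop 1)))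
    = pvG fs ins := by
  induction fs with
  | nil => intro ins; simp [pvSplit, pvG]
  | cons c r ih =>
    intro ins
    by_cases hc : c = '#'
    · subst hc
      rcases hq : pvSplit r with _ | ⟨q, qs⟩
      · exact absurd hq (pvSplit_ne_nil r)
      · have hIH := ih (ins.drop 1)
        rw [hq] at hIH
        simp only [List.length_cons, Nat.add_sub_cancel, List.headD_cons, List.drop_one,
          List.tail_cons] at hIH
        cases ins with
        | nil =>
          simp only [pvSplit, reduceIte, hq, pvG, List.take_nil, List.map_nil,
            List.nil_append, List.length_cons, Nat.add_sub_cancel, List.headD_cons,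
            List.drop_one, List.tail_cons, List.length_nil, Nat.sub_zero,
            List.replicate_succ, List.zip_cons_cons, List.map_cons, List.flatten_cons,
            List.drop_nil]
          simp only [List.tail_nil, List.take_nil, List.map_nil, List.nil_append,
            List.length_nil, Nat.sub_zero] at hIH
          rw [hIH]
        | cons x ins' =>
          simp only [pvSplit, reduceIte, hq, pvG, List.length_cons, Nat.add_sub_cancel,
            List.headD_cons, List.drop_one, List.tail_cons, List.take_succ_cons,
            List.map_cons, List.cons_append, List.zip_cons_cons, List.flatten_cons]
          rw [show qs.length + 1 - ((ins'.take qs.length).length + 1)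
                = qs.length - (ins'.take qs.length).length by omega]
          simp only [List.tail_cons] at hIH
          simp only [List.nil_append, List.take_zero]
          exact congrArg (x :: ·) hIH
    · rcases hq : pvSplit r with _ | ⟨q, qs⟩
      · exact absurd hq (pvSplit_ne_nil r)
      · have hIH := ih ins
        rw [hq] at hIH
        simp only [List.length_cons, Nat.add_sub_cancel, List.headD_cons, List.drop_one,
          List.tail_cons] at hIH
        simp only [pvSplit, if_neg hc, hq, pvConsHead, pvG, List.length_cons,
          Nat.add_sub_cancel, List.headD_cons, List.drop_one, List.tail_cons,
          List.nil_append, List.cons_append]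
        rw [hIH]

-- A's loop equals pvG on the untraversed suffix (loop invariant)
theorem slice_one (ins : List Char) (i : Int) (hi : 0 ≤ i) :
    PySem.List.slice ins (some i) (some (i + 1)) = (ins.drop i.toNat).take 1 := by
  rw [PySem.List.slice_toNat ins hi (by omega : (0:Int) ≤ i + 1)]
  congr 1
  omega

theorem loop_eq (fs : List Char) : ∀ (ins res : List Char) (i : Int), 0 ≤ i →
    (fs.foldl
      (fun (st : List Char × Int) c =>
        if c = '#' then
          (st.1 ++ PySem.List.slice ins (some st.2) (some (st.2 + 1)), st.2 + 1)
        else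
          (st.1 ++ [c], st.2))
      (res, i)).1
    = res ++ pvG fs (ins.drop i.toNat) := by
  induction fs with
  | nil => intro ins res i hi; simp [pvG]
  | cons c cs ih =>
    intro ins res i hi
    by_cases hc : c = '#'
    · subst hc
      simp only [List.foldl_cons, reduceIte, slice_one ins i hi]
      rw [ih ins _ (i + 1) (by omega)]
      have hdrop : ins.drop (i + 1).toNat = (ins.drop i.toNat).drop 1 := by
        rw [List.drop_drop]
        congr 1
        omega
      simp [pvG, hdrop]
    · simp only [List.foldl_cons, if_neg hc]
      rw [ih ins _ i hi]
      simp [pvG, hc]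

-- ===== VERDICT =====
theorem fmt_by_mask_spec : Claim_equal_fmt_by_mask := by
  intro fmt in_str _
  unfold Spec_fmt_by_mask fmt_by_mask fmt_by_mask_alt
  rw [loop_eq fmt.toList in_str.toList [] 0 (by omega)]
  simp only [Int.toNat_zero, List.drop_zero, List.nil_append]
  rw [splitOn_char]
  congr 1
  rw [join_nil_flatten, ← inter_eq fmt.toList in_str.toList]
  rw [PySem.List.slice_to_natCast]
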